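-- pv_equiv track=rewrite | github.com/sinkindg/GOPINATH | Matrixscript.py | decode_matrix
-- ===== SOURCE A (Python) =====
-- def decode_matrix(rows, columns, matrix):
--     decoded_script = ''
--     for j in range(columns):
--         for i in range(rows):
--             char = matrix[i][j]
--             if char.isalnum():
--                 decoded_script += char
--             elif decoded_script and decoded_script[-1] != ' ':
--                 decoded_script += ' '
--     return decoded_script
-- ===== SOURCE B (Python) =====
-- def decode_matrix(rows, columns, matrix):
--     # Flatten column-major, split into alnum runs (tokens), then join with
--     # single spaces; a trailing separator run after at least one token
--     # contributes exactly one trailing space.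
--     seq = [matrix[i][j] for j in range(columns) for i in range(rows)]
--     tokens = []
--     cur = ''
--     for cell in seq:
--         if cell.isalnum():
--             cur += cell
--         elif cur:
--             tokens.append(cur)
--             cur = ''
--     trailing = ' ' if tokens and not cur else ''
--     if cur:
--         tokens.append(cur)
--     return ' '.join(tokens) + trailing
-- ===== Notes on version B (the rewrite author's own statement) =====
-- stated objective: alternative
-- what changed: A builds the string char-by-char with a last-character-is-space test inside the nested loops; B flattens the matrix column-major once, splits the stream into alnum runs (tokens) in a single pass, and produces the result as ' '.join(tokens) plus an explicit trailing space computed at the end.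
import Mathlib
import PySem

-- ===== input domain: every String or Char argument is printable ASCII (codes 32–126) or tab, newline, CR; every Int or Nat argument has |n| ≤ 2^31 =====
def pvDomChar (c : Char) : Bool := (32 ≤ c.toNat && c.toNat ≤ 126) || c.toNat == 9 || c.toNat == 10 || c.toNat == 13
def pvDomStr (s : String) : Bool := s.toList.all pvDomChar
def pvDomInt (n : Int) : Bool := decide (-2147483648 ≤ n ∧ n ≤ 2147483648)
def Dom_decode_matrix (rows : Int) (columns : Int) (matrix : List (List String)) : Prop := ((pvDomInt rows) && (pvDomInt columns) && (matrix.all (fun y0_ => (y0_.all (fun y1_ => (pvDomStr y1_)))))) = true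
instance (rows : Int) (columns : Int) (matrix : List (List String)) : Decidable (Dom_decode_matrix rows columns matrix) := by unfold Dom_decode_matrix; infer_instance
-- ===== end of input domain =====

-- B flattens the matrix column-major once, splits the stream of cells into
-- alnum runs (tokens) in one pass, and returns ' '.join(tokens) plus an
-- explicit trailing space; A instead grows the string cell by cell with a
-- last-character test.  Same cost, different decomposition.

-- ===== PORT A =====
-- loop body of A: append an alnum cell, else append ' ' unless empty or already ending in ' '
def stepA (acc : List Char) (c : String) : List Char :=
  if PySem.Str.strIsalnum c then acc ++ c.toList
  else if acc ≠ [] ∧ PySem.List.pyGet? acc (-1) ≠ some ' ' then acc ++ [' ']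
  else acc

def decode_matrix (rows : Int) (columns : Int) (matrix : List (List String)) : String :=
  String.ofList ((PySem.List.pyRange 0 columns 1).foldl (fun acc j =>
    (PySem.List.pyRange 0 rows 1).foldl (fun acc i =>
      stepA acc (PySem.List.pyGetD (PySem.List.pyGetD matrix i []) j "")) acc) [])

-- ===== PORT B =====
-- seq = [matrix[i][j] for j in range(columns) for i in range(rows)]
def cellsOf (rows : Int) (columns : Int) (matrix : List (List String)) : List String :=
  (PySem.List.pyRange 0 columns 1).flatMap (fun j =>
    (PySem.List.pyRange 0 rows 1).map (fun i =>
      PySem.List.pyGetD (PySem.List.pyGetD matrix i []) j ""))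

-- loop body of B: state = (tokens, cur)
def stepB (st : List (List Char) × List Char) (c : String) : List (List Char) × List Char :=
  if PySem.Str.strIsalnum c then (st.1, st.2 ++ c.toList)
  else if st.2 ≠ [] then (st.1 ++ [st.2], [])
  else st

def decode_matrix_alt (rows : Int) (columns : Int) (matrix : List (List String)) : String :=
  let st := (cellsOf rows columns matrix).foldl stepB ([], [])
  let trailing : List Char := if st.1 ≠ [] ∧ st.2 = [] then [' '] else []
  let tokens := if st.2 ≠ [] then st.1 ++ [st.2] else st.1
  String.ofList (PySem.Chars.join [' '] tokens ++ trailing)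

-- ===== PRECONDITION & SPEC =====
-- A raises IndexError unless, whenever both loops run, every accessed index
-- is in range: rows ≤ len(matrix) and every one of the first `rows` rows has
-- at least `columns` cells.
def Pre_decode_matrix (rows : Int) (columns : Int) (matrix : List (List String)) : Prop :=
  rows ≤ 0 ∨ columns ≤ 0 ∨
    (rows ≤ (matrix.length : Int) ∧
      ∀ row ∈ matrix.take rows.toNat, columns ≤ (row.length : Int))
instance (rows : Int) (columns : Int) (matrix : List (List String)) : Decidable (Pre_decode_matrix rows columns matrix) := by unfold Pre_decode_matrix; infer_instance

def pvWitness_decode_matrix : Int × Int × List (List String) :=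
  (2, 3, [["a", "!", "b"], ["1", " ", "c"]])

def Spec_decode_matrix (rows : Int) (columns : Int) (matrix : List (List String)) (out : String) : Prop := out = decode_matrix_alt rows columns matrix
instance (rows : Int) (columns : Int) (matrix : List (List String)) (out : String) : Decidable (Spec_decode_matrix rows columns matrix out) := by unfold Spec_decode_matrix; infer_instance

-- ===== CLAIM (what is proved, stated in full; the proofs are below) =====
def Claim_equal_decode_matrix : Prop := ∀ (rows : Int) (columns : Int) (matrix : List (List String)), Dom_decode_matrix rows columns matrix → Pre_decode_matrix rows columns matrix → Spec_decode_matrix rows columns matrix (decode_matrix rows columns matrix)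

-- ===== LEMMAS AND PROOFS =====

-- rendering of B's loop state as the string A has built at the same point
def renderSt (st : List (List Char) × List Char) : List Char :=
  if st.2 = [] then
    (if st.1 = [] then [] else PySem.Chars.join [' '] st.1 ++ [' '])
  else PySem.Chars.join [' '] (st.1 ++ [st.2])

theorem join_append_singleton (ts : List (List Char)) (c : List Char) (h : ts ≠ []) :
    PySem.Chars.join [' '] (ts ++ [c]) = PySem.Chars.join [' '] ts ++ ' ' :: c := by
  induction ts with
  | nil => exact absurd rfl h
  | cons t ts ih =>
    cases ts with
    | nil => simp [PySem.Chars.join_singleton, PySem.Chars.join_cons_cons]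
    | cons u us =>
      have h1 : (t :: u :: us) ++ [c] = t :: u :: (us ++ [c]) := rfl
      have h3 : u :: (us ++ [c]) = (u :: us) ++ [c] := rfl
      rw [h1, PySem.Chars.join_cons_cons, PySem.Chars.join_cons_cons, h3, ih (by simp)]
      simp

theorem isalnum_ne_space {ch : Char} (h : PySem.Chars.isalnum ch = true) : ch ≠ ' ' := by
  intro he; subst he; exact absurd h (by decide)

theorem invariant (L : List String) :
    ∀ (tokens : List (List Char)) (cur : List Char),
      (∀ ch ∈ cur, PySem.Chars.isalnum ch = true) →
      L.foldl stepA (renderSt (tokens, cur)) = renderSt (L.foldl stepB (tokens, cur)) := by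
  induction L with
  | nil => intro tokens cur _; rfl
  | cons c L ih =>
    intro tokens cur hcur
    simp only [List.foldl_cons]
    by_cases halnum : PySem.Str.strIsalnum c = true
    · have hal : PySem.Chars.strIsalnum c.toList = true := by simpa using halnum
      have hcne : c.toList ≠ [] := by
        intro h0; rw [PySem.Chars.strIsalnum, h0] at hal; simp at hal
      have hall : ∀ ch ∈ c.toList, PySem.Chars.isalnum ch = true := by
        rw [PySem.Chars.strIsalnum] at hal
        exact fun ch hch => List.all_eq_true.mp (Bool.and_elim_right hal) ch hch
      have hstep : stepB (tokens, cur) c = (tokens, cur ++ c.toList) := by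
        simp [stepB, hal]
      have hchars : ∀ ch ∈ cur ++ c.toList, PySem.Chars.isalnum ch = true := by
        intro ch hch
        rcases List.mem_append.mp hch with h | h
        · exact hcur ch h
        · exact hall ch h
      have hA : stepA (renderSt (tokens, cur)) c = renderSt (tokens, cur ++ c.toList) := by
        simp only [stepA, halnum, if_pos]
        by_cases hc0 : cur = []
        · subst hc0
          by_cases ht0 : tokens = []
          · subst ht0
            simp [renderSt, hcne, PySem.Chars.join_singleton]
          · simp only [renderSt, List.nil_append, if_neg ht0, if_neg hcne]
            rw [join_append_singleton tokens c.toList ht0]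
            simp
        · simp only [renderSt, if_neg hc0, if_neg (by simp [hc0] : ¬cur ++ c.toList = [])]
          cases tokens with
          | nil => simp [PySem.Chars.join_singleton]
          | cons t ts =>
            rw [join_append_singleton (t :: ts) cur (by simp),
              join_append_singleton (t :: ts) (cur ++ c.toList) (by simp)]
            simp
      rw [hA, hstep, ih _ _ hchars]
    · have hal : PySem.Chars.strIsalnum c.toList = false := by
        simpa using halnum
      by_cases hc0 : cur = []
      · subst hc0
        have hstep : stepB (tokens, []) c = (tokens, []) := by simp [stepB, hal]
        have hA : stepA (renderSt (tokens, [])) c = renderSt (tokens, []) := by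
          by_cases ht0 : tokens = []
          · subst ht0; simp [stepA, hal, renderSt]
          · simp only [renderSt, if_neg ht0]
            simp [stepA, hal, PySem.List.pyGet?_neg_one]
        rw [hA, hstep, ih _ _ (by simp)]
      · have hstep : stepB (tokens, cur) c = (tokens ++ [cur], []) := by
          simp [stepB, hal, hc0]
        have hA : stepA (renderSt (tokens, cur)) c = renderSt (tokens ++ [cur], []) := by
          have hacc : renderSt (tokens, cur) = PySem.Chars.join [' '] (tokens ++ [cur]) := by
            simp [renderSt, hc0]
          have hlast : (PySem.Chars.join [' '] (tokens ++ [cur])).getLast? = cur.getLast? := by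
            cases tokens with
            | nil => simp [PySem.Chars.join_singleton]
            | cons t ts =>
              rw [join_append_singleton (t :: ts) cur (by simp)]
              rw [List.getLast?_append]
              have : (' ' :: cur).getLast? = cur.getLast? := by
                cases hg : cur.getLast? with
                | none => exact absurd (List.getLast?_eq_none_iff.mp hg) hc0
                | some x =>
                  rw [List.getLast?_cons, hg]; rfl
              rw [this]
              cases hg : cur.getLast? with
              | none => exact absurd (List.getLast?_eq_none_iff.mp hg) hc0
              | some x => rfl
          have hne : PySem.Chars.join [' '] (tokens ++ [cur]) ≠ [] := by
            cases tokens with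
            | nil => simpa [PySem.Chars.join_singleton] using hc0
            | cons t ts => rw [join_append_singleton (t :: ts) cur (by simp)]; simp
          have hlastne : (PySem.Chars.join [' '] (tokens ++ [cur])).getLast? ≠ some ' ' := by
            rw [hlast]
            cases hg : cur.getLast? with
            | none => simp
            | some x =>
              have hx : x ∈ cur := List.mem_of_getLast? hg
              simpa using isalnum_ne_space (hcur x hx)
          rw [hacc]
          simp only [stepA]
          rw [if_neg (by simp [hal] : ¬PySem.Str.strIsalnum c = true),
            if_pos ⟨hne, by rw [PySem.List.pyGet?_neg_one]; exact hlastne⟩]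
          simp [renderSt]
        rw [hA, hstep, ih _ _ (by simp)]

theorem final_render (st : List (List Char) × List Char) :
    PySem.Chars.join [' ']
        (if st.2 ≠ [] then st.1 ++ [st.2] else st.1) ++
      (if st.1 ≠ [] ∧ st.2 = [] then [' '] else []) = renderSt st := by
  obtain ⟨tokens, cur⟩ := st
  by_cases hc : cur = []
  · subst hc
    by_cases ht : tokens = []
    · subst ht; simp [renderSt, PySem.Chars.join_nil]
    · simp [renderSt, ht]
  · simp [renderSt, hc]

theorem foldl_flatMap {α β γ : Type} (l : List β) (g : β → List α) (f : γ → α → γ)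
    (init : γ) :
    (l.flatMap g).foldl f init = l.foldl (fun acc x => (g x).foldl f acc) init := by
  induction l generalizing init with
  | nil => rfl
  | cons x xs ih => simp only [List.flatMap_cons, List.foldl_append, List.foldl_cons, ih]

theorem nested_eq_flat (rows columns : Int) (matrix : List (List String)) :
    (PySem.List.pyRange 0 columns 1).foldl (fun acc j =>
      (PySem.List.pyRange 0 rows 1).foldl (fun acc i =>
        stepA acc (PySem.List.pyGetD (PySem.List.pyGetD matrix i []) j "")) acc) [] =
    (cellsOf rows columns matrix).foldl stepA [] := by
  unfold cellsOf
  rw [foldl_flatMap]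
  simp only [List.foldl_map]

-- ===== VERDICT (by name: the statement is the Claim_ definition above) =====
theorem decode_matrix_spec : Claim_equal_decode_matrix := by
  intro rows columns matrix _ _
  unfold Spec_decode_matrix decode_matrix decode_matrix_alt
  rw [nested_eq_flat]
  have h := invariant (cellsOf rows columns matrix) [] [] (by simp)
  have h0 : renderSt (([] : List (List Char)), ([] : List Char)) = [] := by simp [renderSt]
  rw [h0] at h
  rw [h]
  exact congrArg String.ofList (final_render _).symm
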